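-- pv_equiv track=rewrite | github.com/Larissa-11/INNSE | codes/encode_rule.py | delete_check
-- ===== SOURCE A (Python) =====
-- def delete_one_element(lst):
--     all_combinations = []
--     for i in range(len(lst)):
--         new_lst = list(lst)
--         del new_lst[i]
--         all_combinations.append(tuple(new_lst))
--     return all_combinations
--
-- def delete_check(seq1, seq2):
--     combinations_seq1 = delete_one_element(seq1)
--     combinations_seq2 = delete_one_element(seq2)
--     for tuple1 in combinations_seq1:
--         for tuple2 in combinations_seq2:
--             if tuple1 == tuple2:
--                 return True
--     return False
-- ===== SOURCE B (Python) =====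
-- def delete_check(seq1, seq2):
--     # One deletion from each can only match if lengths are equal and nonzero.
--     if len(seq1) != len(seq2) or not seq1:
--         return False
--     for i in range(len(seq1)):
--         s = list(seq1)
--         del s[i]
--         # greedy: first index where s and seq2 disagree; if seq2 with one
--         # deletion can equal s at all, deleting at this index works
--         m = 0
--         while m < len(s) and s[m] == seq2[m]:
--             m += 1
--         t = list(seq2)
--         del t[m]
--         if t == s:
--             return True
--     return False
-- ===== Notes on version B (the rewrite author's own statement) =====
-- stated objective: faster
-- what changed: Instead of materializing all single-deletion variants of both sequences and comparing every pair, B loops only over deletions of seq1 and for each uses a greedy linear first-mismatch scan to decide whether seq2 can match with one deletion, after an O(1) length/emptiness guard.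
import Mathlib
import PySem

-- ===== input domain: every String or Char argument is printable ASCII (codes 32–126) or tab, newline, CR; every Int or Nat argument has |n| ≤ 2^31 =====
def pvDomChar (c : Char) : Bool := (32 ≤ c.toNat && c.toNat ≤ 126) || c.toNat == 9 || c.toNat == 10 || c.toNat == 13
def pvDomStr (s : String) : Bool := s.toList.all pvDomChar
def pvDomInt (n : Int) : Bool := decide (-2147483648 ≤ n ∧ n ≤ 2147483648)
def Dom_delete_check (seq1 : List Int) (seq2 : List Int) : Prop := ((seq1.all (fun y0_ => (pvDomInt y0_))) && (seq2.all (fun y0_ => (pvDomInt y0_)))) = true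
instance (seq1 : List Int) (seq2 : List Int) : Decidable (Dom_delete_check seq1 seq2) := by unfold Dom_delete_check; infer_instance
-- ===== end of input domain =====

-- B replaces A's quadratic enumeration of deletion-pairs by a single loop over deletions of seq1
-- with a linear greedy first-mismatch check against seq2 (faster: O(n^2) instead of O(n^3)).


-- ===== PORT A =====
-- for i in range(len(lst)): new_lst = list(lst); del new_lst[i]; append(tuple(new_lst))
def delete_one_element (lst : List Int) : List (List Int) :=
  (PySem.List.pyRange 0 lst.length 1).foldl
    (fun acc i => acc ++ [lst.eraseIdx i.toNat]) []

def delete_check (seq1 : List Int) (seq2 : List Int) : Bool :=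
  let combinations_seq1 := delete_one_element seq1
  let combinations_seq2 := delete_one_element seq2
  -- nested for-loops with early 'return True'
  combinations_seq1.any (fun tuple1 => combinations_seq2.any (fun tuple2 => tuple1 == tuple2))

-- ===== PORT B =====
-- the 'while m < len(s) and s[m] == seq2[m]: m += 1' loop; in B's use len(t) = len(s)+1,
-- so the loop stops exactly when s is exhausted or a mismatch is found (exact on that use)
def fmAux : List Int → List Int → Nat → Nat
  | a :: as, b :: bs, m => if a == b then fmAux as bs (m + 1) else m
  | _, _, m => m

def delete_check_alt (seq1 : List Int) (seq2 : List Int) : Bool :=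
  if seq1.length ≠ seq2.length ∨ seq1.isEmpty then false
  else
    (List.range seq1.length).any (fun i =>
      let s := seq1.eraseIdx i        -- s = list(seq1); del s[i]
      let m := fmAux s seq2 0         -- greedy first-mismatch scan
      seq2.eraseIdx m == s)           -- t = list(seq2); del t[m]; t == s

-- ===== PRECONDITION & SPEC =====
def Spec_delete_check (seq1 : List Int) (seq2 : List Int) (out : Bool) : Prop := out = delete_check_alt seq1 seq2
instance (seq1 : List Int) (seq2 : List Int) (out : Bool) : Decidable (Spec_delete_check seq1 seq2 out) := by unfold Spec_delete_check; infer_instance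

-- ===== CLAIM (what is proved, stated in full; the proofs are below) =====
def Claim_equal_delete_check : Prop := ∀ (seq1 : List Int) (seq2 : List Int), Dom_delete_check seq1 seq2 → Spec_delete_check seq1 seq2 (delete_check seq1 seq2)

-- ===== LEMMAS AND PROOFS =====

theorem foldl_append_singleton (f : Int → List Int) :
    ∀ (l : List Int) (acc : List (List Int)),
      l.foldl (fun acc i => acc ++ [f i]) acc = acc ++ l.map f := by
  intro l
  induction l with
  | nil => simp
  | cons a as ih => intro acc; simp [List.foldl, ih]

theorem doe_eq (lst : List Int) :
    delete_one_element lst = (List.range lst.length).map (fun i => lst.eraseIdx i) := by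
  unfold delete_one_element
  rw [PySem.List.pyRange_one]
  rw [foldl_append_singleton]
  simp [List.map_map, Function.comp]

theorem A_iff (s1 s2 : List Int) :
    delete_check s1 s2 = true ↔
      ∃ i < s1.length, ∃ j < s2.length, s1.eraseIdx i = s2.eraseIdx j := by
  unfold delete_check
  simp [doe_eq, List.any_eq_true, List.mem_range]

theorem fmAux_succ : ∀ (s t : List Int) (m : Nat), fmAux s t (m + 1) = fmAux s t m + 1 := by
  intro s
  induction s with
  | nil => intro t m; cases t <;> simp [fmAux]
  | cons a as ih =>
    intro t m
    cases t with
    | nil => simp [fmAux]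
    | cons b bs =>
      simp only [fmAux]
      by_cases h : a == b <;> simp [h, ih]

theorem fmAux_le : ∀ (s t : List Int), fmAux s t 0 ≤ s.length := by
  intro s
  induction s with
  | nil => intro t; cases t <;> simp [fmAux]
  | cons a as ih =>
    intro t
    cases t with
    | nil => simp [fmAux]
    | cons b bs =>
      simp only [fmAux]
      by_cases h : a == b
      · simp [h, fmAux_succ]; exact ih bs
      · simp [h]

-- the greedy lemma: if some deletion of t equals s, then deleting at the first mismatch works
theorem fmAux_greedy : ∀ (t s : List Int) (j : Nat),
    t.eraseIdx j = s → t.eraseIdx (fmAux s t 0) = s := by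
  intro t
  induction t with
  | nil =>
    intro s j h
    simp [List.eraseIdx] at h
    subst h; rfl
  | cons b bs ih =>
    intro s j h
    cases j with
    | zero =>
      simp [List.eraseIdx] at h
      subst h
      cases bs with
      | nil => simp [fmAux]
      | cons c cs =>
        simp only [fmAux]
        have hce : (c :: cs).eraseIdx (fmAux cs (c :: cs) 0) = cs := ih cs 0 rfl
        by_cases hbc : c = b
        · subst hbc
          simp [fmAux_succ, hce]
        · simp [hbc]
    | succ k =>
      cases s with
      | nil => simp [List.eraseIdx] at h
      | cons a as =>
        simp only [List.eraseIdx] at h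
        have hba : b = a := (List.cons.injEq _ _ _ _ ▸ h).1
        have htl : bs.eraseIdx k = as := (List.cons.injEq _ _ _ _ ▸ h).2
        subst hba
        simp only [fmAux, beq_self_eq_true, if_true]
        rw [fmAux_succ]
        simp [List.eraseIdx, ih as k htl]

theorem B_iff (s1 s2 : List Int) :
    delete_check_alt s1 s2 = true ↔
      (s1.length = s2.length ∧ s1 ≠ [] ∧
        ∃ i < s1.length, s2.eraseIdx (fmAux (s1.eraseIdx i) s2 0) = s1.eraseIdx i) := by
  unfold delete_check_alt
  by_cases h : s1.length ≠ s2.length ∨ s1.isEmpty = true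
  · rw [if_pos h]
    constructor
    · intro hf; exact absurd hf (by simp)
    · rintro ⟨hlen, hne, _⟩
      rcases h with h | h
      · exact (h hlen).elim
      · exact (hne (List.isEmpty_iff.mp h)).elim
  · rw [if_neg h]
    have hlen : s1.length = s2.length := by
      by_contra hc; exact h (Or.inl hc)
    have hne : s1 ≠ [] := by
      intro he; exact h (Or.inr (by simp [he]))
    simp only [List.any_eq_true, List.mem_range, beq_iff_eq]
    constructor
    · rintro ⟨i, hi, hg⟩; exact ⟨hlen, hne, i, hi, hg⟩
    · rintro ⟨_, _, i, hi, hg⟩; exact ⟨i, hi, hg⟩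

-- ===== VERDICT (by name: the statement is the Claim_ definition above) =====
theorem delete_check_spec : Claim_equal_delete_check := by
  intro seq1 seq2 _
  unfold Spec_delete_check
  by_cases ha : delete_check seq1 seq2 = true
  · obtain ⟨i, hi, j, hj, hij⟩ := (A_iff seq1 seq2).mp ha
    have h1 : (seq1.eraseIdx i).length = seq1.length - 1 := by
      simp [List.length_eraseIdx, hi]
    have h2 : (seq2.eraseIdx j).length = seq2.length - 1 := by
      simp [List.length_eraseIdx, hj]
    have h3 := congrArg List.length hij
    have hlen : seq1.length = seq2.length := by omega
    have hne : seq1 ≠ [] := by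
      intro h; subst h; simp at hi
    have hg : seq2.eraseIdx (fmAux (seq1.eraseIdx i) seq2 0) = seq1.eraseIdx i :=
      fmAux_greedy seq2 (seq1.eraseIdx i) j hij.symm
    rw [ha]
    exact ((B_iff seq1 seq2).mpr ⟨hlen, hne, i, hi, hg⟩).symm
  · by_cases hb : delete_check_alt seq1 seq2 = true
    · obtain ⟨hlen, hne, i, hi, hg⟩ := (B_iff seq1 seq2).mp hb
      exfalso
      apply ha
      apply (A_iff seq1 seq2).mpr
      refine ⟨i, hi, fmAux (seq1.eraseIdx i) seq2 0, ?_, hg.symm⟩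
      have hle := fmAux_le (seq1.eraseIdx i) seq2
      have h1 : (seq1.eraseIdx i).length = seq1.length - 1 := by
        simp [List.length_eraseIdx, hi]
      omega
    · simp only [Bool.not_eq_true] at ha hb
      rw [ha, hb]
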